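-- pv_equiv track=rewrite | github.com/BnMcGn/vibase | vibase.py | decide_action
-- ===== SOURCE A (Python) =====
-- def decide_action(rows):
--     refs = []
--     edits = []
--     dels = []
--     for ref, edit in rows:
--         if edit:
--             refs.append(ref)
--             edits.append(edit)
--         else:
--             dels.append(ref)
--     return {'reference': refs, 'edit': edits, 'delete': dels}
-- ===== SOURCE B (Python) =====
-- def decide_action(rows):
--     rows = list(rows)
--     return {'reference': [ref for ref, edit in rows if edit],
--             'edit': [edit for ref, edit in rows if edit],
--             'delete': [ref for ref, edit in rows if not edit]}
-- ===== Notes on version B (the rewrite author's own statement) =====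
-- stated objective: idiomatic
-- what changed: Replaces the single accumulating loop over three mutable lists with three filtering comprehensions over the materialized row list, building the result dict in one expression.
import Mathlib
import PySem

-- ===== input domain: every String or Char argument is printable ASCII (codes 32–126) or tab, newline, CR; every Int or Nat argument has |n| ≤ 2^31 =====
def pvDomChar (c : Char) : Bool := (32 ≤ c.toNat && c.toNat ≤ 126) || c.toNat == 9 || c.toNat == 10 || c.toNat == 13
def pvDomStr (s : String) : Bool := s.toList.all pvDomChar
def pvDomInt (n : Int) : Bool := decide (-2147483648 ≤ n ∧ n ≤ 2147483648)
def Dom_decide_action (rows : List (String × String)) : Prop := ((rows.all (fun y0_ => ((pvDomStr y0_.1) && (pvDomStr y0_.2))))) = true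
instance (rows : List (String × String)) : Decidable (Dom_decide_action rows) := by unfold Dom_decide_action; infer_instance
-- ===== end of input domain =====

-- B rebuilds the same dict with three filtering comprehensions instead of one accumulating loop (idiomatic decomposition; same cost).
-- ===== PORT A =====
-- Port of A: one pass accumulating (refs, edits, dels).
def decide_action (rows : List (String × String)) : List (String × List String) :=
  let st := rows.foldl (fun (acc : List String × List String × List String) r =>
    if r.2 ≠ "" then (acc.1 ++ [r.1], acc.2.1 ++ [r.2], acc.2.2)
    else (acc.1, acc.2.1, acc.2.2 ++ [r.1])) ([], [], [])
  [("reference", st.1), ("edit", st.2.1), ("delete", st.2.2)]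

-- ===== PORT B =====
-- Port of B: three filtering comprehensions over the same list.
def decide_action_alt (rows : List (String × String)) : List (String × List String) :=
  [("reference", (rows.filter (fun r => r.2 ≠ "")).map (·.1)),
   ("edit", (rows.filter (fun r => r.2 ≠ "")).map (·.2)),
   ("delete", (rows.filter (fun r => r.2 = "")).map (·.1))]

-- ===== PRECONDITION & SPEC =====
def Spec_decide_action (rows : List (String × String)) (out : List (String × List String)) : Prop := out = decide_action_alt rows
instance (rows : List (String × String)) (out : List (String × List String)) : Decidable (Spec_decide_action rows out) := by unfold Spec_decide_action; infer_instance

-- ===== CLAIM (what is proved, stated in full; the proofs are below) =====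
def Claim_equal_decide_action : Prop := ∀ (rows : List (String × String)), Dom_decide_action rows → Spec_decide_action rows (decide_action rows)

-- ===== LEMMAS AND PROOFS =====

-- ===== VERDICT (by name: the statement is the Claim_ definition above) =====
lemma fold_inv (rows : List (String × String)) (refs edits dels : List String) :
    rows.foldl (fun (acc : List String × List String × List String) r =>
      if r.2 ≠ "" then (acc.1 ++ [r.1], acc.2.1 ++ [r.2], acc.2.2)
      else (acc.1, acc.2.1, acc.2.2 ++ [r.1])) (refs, edits, dels)
    = (refs ++ (rows.filter (fun r => r.2 ≠ "")).map (·.1),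
       edits ++ (rows.filter (fun r => r.2 ≠ "")).map (·.2),
       dels ++ (rows.filter (fun r => r.2 = "")).map (·.1)) := by
  induction rows generalizing refs edits dels with
  | nil => simp
  | cons r rs ih =>
    rw [List.foldl_cons]
    by_cases h : r.2 = ""
    · rw [if_neg (by simp [h]), ih]
      simp [List.filter_cons, h]
    · rw [if_pos (by simp [h]), ih]
      simp [List.filter_cons, h]

theorem decide_action_spec : Claim_equal_decide_action := by
  intro rows _
  unfold Spec_decide_action decide_action decide_action_alt
  rw [fold_inv rows [] [] []]
  simp
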